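-- pv_equiv track=rewrite | github.com/AppLetico/prscope | src/prscope/planning/runtime/pipeline/stages.py | _prioritized_frontend_test_targets
-- ===== SOURCE A (Python) =====
-- def _prioritized_frontend_test_targets(paths: list[str]) -> list[str]:
--     def _score(path: str) -> tuple[int, str]:
--         normalized = str(path).strip()
--         if "/pages/" in normalized:
--             return (0, normalized)
--         if "/components/" in normalized:
--             return (1, normalized)
--         if "/lib/" in normalized:
--             return (3, normalized)
--         return (2, normalized)
--
--     return [path for _, path in sorted((_score(path) for path in paths), key=lambda item: item[0])]
-- ===== SOURCE B (Python) =====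
-- def _prioritized_frontend_test_targets(paths: list[str]) -> list[str]:
--     # One pass into four ordered buckets (pages, components, other, lib), then concatenate.
--     pages, components, other, lib = [], [], [], []
--     for path in paths:
--         normalized = str(path).strip()
--         if "/pages/" in normalized:
--             pages.append(normalized)
--         elif "/components/" in normalized:
--             components.append(normalized)
--         elif "/lib/" in normalized:
--             lib.append(normalized)
--         else:
--             other.append(normalized)
--     return pages + components + other + lib
-- ===== Notes on version B (the rewrite author's own statement) =====
-- stated objective: faster
-- what changed: Replaced the sort-by-score over scored tuples with a single pass distributing stripped paths into four ordered buckets that are then concatenated (stability = input order per bucket).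
import Mathlib
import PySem

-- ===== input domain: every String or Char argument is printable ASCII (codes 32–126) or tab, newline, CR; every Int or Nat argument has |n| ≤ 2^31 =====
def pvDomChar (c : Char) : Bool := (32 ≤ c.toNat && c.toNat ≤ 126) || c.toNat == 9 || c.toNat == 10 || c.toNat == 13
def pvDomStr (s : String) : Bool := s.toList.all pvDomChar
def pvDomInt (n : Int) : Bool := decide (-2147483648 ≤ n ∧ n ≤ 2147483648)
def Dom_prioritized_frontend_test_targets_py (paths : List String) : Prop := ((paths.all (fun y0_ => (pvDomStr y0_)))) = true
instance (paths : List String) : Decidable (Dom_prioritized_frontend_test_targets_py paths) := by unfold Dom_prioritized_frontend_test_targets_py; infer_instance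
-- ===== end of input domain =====

-- B replaces the stable sort by score with a single-pass distribution into four ordered buckets (faster: O(n·L) vs O(n log n·L)).


-- ===== PORT A =====
-- _score helper of A
def pvScore (path : String) : Int × String :=
  let normalized := PySem.Str.strip path
  if PySem.Str.isIn "/pages/" normalized then (0, normalized)
  else if PySem.Str.isIn "/components/" normalized then (1, normalized)
  else if PySem.Str.isIn "/lib/" normalized then (3, normalized)
  else (2, normalized)

def prioritized_frontend_test_targets_py (paths : List String) : List String :=
  (PySem.List.sorted (paths.map pvScore) (fun item => item.1)).map (fun item => item.2)

-- ===== PORT B =====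
-- the loop body of Source B: distribute strip(path) into one of four buckets
def pvAltStep (acc : List String × List String × List String × List String) (path : String) :
    List String × List String × List String × List String :=
  let normalized := PySem.Str.strip path
  if PySem.Str.isIn "/pages/" normalized then (acc.1 ++ [normalized], acc.2.1, acc.2.2.1, acc.2.2.2)
  else if PySem.Str.isIn "/components/" normalized then (acc.1, acc.2.1 ++ [normalized], acc.2.2.1, acc.2.2.2)
  else if PySem.Str.isIn "/lib/" normalized then (acc.1, acc.2.1, acc.2.2.1, acc.2.2.2 ++ [normalized])
  else (acc.1, acc.2.1, acc.2.2.1 ++ [normalized], acc.2.2.2)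

def prioritized_frontend_test_targets_py_alt (paths : List String) : List String :=
  let r := paths.foldl pvAltStep ([], [], [], [])
  r.1 ++ r.2.1 ++ r.2.2.1 ++ r.2.2.2

-- ===== PRECONDITION & SPEC =====
def Spec_prioritized_frontend_test_targets_py (paths : List String) (out : List String) : Prop := out = prioritized_frontend_test_targets_py_alt paths
instance (paths : List String) (out : List String) : Decidable (Spec_prioritized_frontend_test_targets_py paths out) := by unfold Spec_prioritized_frontend_test_targets_py; infer_instance

-- ===== CLAIM (what is proved, stated in full; the proofs are below) =====
def Claim_equal_prioritized_frontend_test_targets_py : Prop := ∀ (paths : List String), Dom_prioritized_frontend_test_targets_py paths → Spec_prioritized_frontend_test_targets_py paths (prioritized_frontend_test_targets_py paths)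

-- ===== LEMMAS AND PROOFS =====

-- insert at the block boundary: before is false on all of u, true on all of v
theorem pvInsertBy_boundary {α : Type} (b : α → α → Bool) (x : α) (u v : List α)
    (hu : ∀ y ∈ u, b x y = false) (hv : ∀ y ∈ v, b x y = true) :
    PySem.List.insertBy b x (u ++ v) = u ++ x :: v := by
  induction u with
  | nil =>
      cases v with
      | nil => simp [PySem.List.insertBy]
      | cons y ys => simp [PySem.List.insertBy, hv y (by simp)]
  | cons y u ih =>
      have hy : b x y = false := hu y (by simp)
      simp only [List.cons_append, PySem.List.insertBy, hy]
      simp [ih (fun z hz => hu z (by simp [hz]))]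

-- scores are 0,1,2,3
theorem pvScore_fst (p : String) :
    (pvScore p).1 = 0 ∨ (pvScore p).1 = 1 ∨ (pvScore p).1 = 2 ∨ (pvScore p).1 = 3 := by
  unfold pvScore
  dsimp only
  split_ifs <;> simp

-- the stable sort of a list of pairs with keys among {0,1,2,3} is its four key-filters concatenated
theorem pvSorted_buckets (ps : List (Int × String))
    (h : ∀ p ∈ ps, p.1 = 0 ∨ p.1 = 1 ∨ p.1 = 2 ∨ p.1 = 3) :
    PySem.List.sorted ps (fun item => item.1) =
      ps.filter (fun p => p.1 == 0) ++ ps.filter (fun p => p.1 == 1) ++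
      ps.filter (fun p => p.1 == 2) ++ ps.filter (fun p => p.1 == 3) := by
  induction ps using List.reverseRecOn with
  | nil => simp [PySem.List.sorted]
  | append_singleton ps p ih =>
      have hps : ∀ q ∈ ps, q.1 = 0 ∨ q.1 = 1 ∨ q.1 = 2 ∨ q.1 = 3 :=
        fun q hq => h q (by simp [hq])
      have hsort : PySem.List.sorted (ps ++ [p]) (fun item => item.1) =
          PySem.List.insertBy (fun a b => decide (a.1 < b.1)) p
            (PySem.List.sorted ps (fun item => item.1)) := by
        rw [PySem.List.sorted_eq_foldl_insertBy, PySem.List.sorted_eq_foldl_insertBy,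
          List.foldl_append]
        rfl
      rw [hsort, ih hps]
      rcases h p (by simp) with hk | hk | hk | hk
      · rw [show ps.filter (fun q => q.1 == (0:Int)) ++ ps.filter (fun q => q.1 == 1) ++
              ps.filter (fun q => q.1 == 2) ++ ps.filter (fun q => q.1 == 3)
            = ps.filter (fun q => q.1 == (0:Int)) ++ (ps.filter (fun q => q.1 == 1) ++
              (ps.filter (fun q => q.1 == 2) ++ ps.filter (fun q => q.1 == 3))) by simp]
        rw [pvInsertBy_boundary _ p _ _
          (by intro y hy; simp at hy; simp [hy.2, hk])
          (by intro y hy; simp at hy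
              rcases hy with ⟨_, h⟩ | ⟨_, h⟩ | ⟨_, h⟩ <;> simp [h, hk])]
        simp [List.filter_append, List.filter, hk]
      · rw [show ps.filter (fun q => q.1 == (0:Int)) ++ ps.filter (fun q => q.1 == 1) ++
              ps.filter (fun q => q.1 == 2) ++ ps.filter (fun q => q.1 == 3)
            = (ps.filter (fun q => q.1 == (0:Int)) ++ ps.filter (fun q => q.1 == 1)) ++
              (ps.filter (fun q => q.1 == 2) ++ ps.filter (fun q => q.1 == 3)) by simp]
        rw [pvInsertBy_boundary _ p _ _
          (by intro y hy; simp at hy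
              rcases hy with ⟨_, h⟩ | ⟨_, h⟩ <;> simp [h, hk])
          (by intro y hy; simp at hy
              rcases hy with ⟨_, h⟩ | ⟨_, h⟩ <;> simp [h, hk])]
        simp [List.filter_append, List.filter, hk]
      · rw [show ps.filter (fun q => q.1 == (0:Int)) ++ ps.filter (fun q => q.1 == 1) ++
              ps.filter (fun q => q.1 == 2) ++ ps.filter (fun q => q.1 == 3)
            = (ps.filter (fun q => q.1 == (0:Int)) ++ ps.filter (fun q => q.1 == 1) ++
              ps.filter (fun q => q.1 == 2)) ++ ps.filter (fun q => q.1 == 3) by simp]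
        rw [pvInsertBy_boundary _ p _ _
          (by intro y hy; simp at hy
              rcases hy with ⟨_, h⟩ | ⟨_, h⟩ | ⟨_, h⟩ <;> simp [h, hk])
          (by intro y hy; simp at hy; simp [hy.2, hk])]
        simp [List.filter_append, List.filter, hk]
      · rw [show ps.filter (fun q => q.1 == (0:Int)) ++ ps.filter (fun q => q.1 == 1) ++
              ps.filter (fun q => q.1 == 2) ++ ps.filter (fun q => q.1 == 3)
            = (ps.filter (fun q => q.1 == (0:Int)) ++ ps.filter (fun q => q.1 == 1) ++
              ps.filter (fun q => q.1 == 2) ++ ps.filter (fun q => q.1 == 3)) ++ [] by simp]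
        rw [pvInsertBy_boundary _ p _ _
          (by intro y hy; simp at hy
              rcases hy with ⟨_, h⟩ | ⟨_, h⟩ | ⟨_, h⟩ | ⟨_, h⟩ <;> simp [h, hk])
          (by intro y hy; simp at hy)]
        simp [List.filter_append, List.filter, hk]

-- B's fold appends, bucket by bucket, the snd of the key-i filters of the scored list
theorem pvFold_buckets (paths : List String)
    (acc : List String × List String × List String × List String) :
    paths.foldl pvAltStep acc =
      (acc.1 ++ ((paths.map pvScore).filter (fun p => p.1 == 0)).map (fun p => p.2),
       acc.2.1 ++ ((paths.map pvScore).filter (fun p => p.1 == 1)).map (fun p => p.2),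
       acc.2.2.1 ++ ((paths.map pvScore).filter (fun p => p.1 == 2)).map (fun p => p.2),
       acc.2.2.2 ++ ((paths.map pvScore).filter (fun p => p.1 == 3)).map (fun p => p.2)) := by
  induction paths generalizing acc with
  | nil => simp
  | cons p ps ih =>
      simp only [List.foldl_cons, List.map_cons]
      rw [ih (pvAltStep acc p)]
      unfold pvAltStep pvScore
      dsimp only
      split_ifs <;> simp [List.filter]

-- ===== VERDICT (by name: the statement is the Claim_ definition above) =====
theorem prioritized_frontend_test_targets_py_spec : Claim_equal_prioritized_frontend_test_targets_py := by
  intro paths _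
  unfold Spec_prioritized_frontend_test_targets_py prioritized_frontend_test_targets_py
    prioritized_frontend_test_targets_py_alt
  rw [pvSorted_buckets (paths.map pvScore)
      (by intro p hp; simp at hp; obtain ⟨s, _, rfl⟩ := hp; exact pvScore_fst s),
    pvFold_buckets paths ([], [], [], [])]
  simp
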